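-- pv_equiv track=rewrite | github.com/ZackBudai/lar | src/lar/tptp.py | _tokenize_formula
-- ===== SOURCE A (Python) =====
-- def _tokenize_formula(text: str) -> list[str]:
--     tokens: list[str] = []
--     i = 0
--     n = len(text)
--
--     while i < n:
--         ch = text[i]
--         if ch in " \t\r\n":
--             i = i + 1
--             continue
--
--         if i + 2 < n and text[i : i + 3] == "<=>":
--             tokens.append("<=>")
--             i = i + 3
--             continue
--
--         if i + 1 < n and text[i : i + 2] == "=>":
--             tokens.append("=>")
--             i = i + 2
--             continue
--
--         if ch in "(),[]:~&|!?":
--             tokens.append(ch)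
--             i = i + 1
--             continue
--
--         if ch.isalnum() or ch in "_$":
--             start = i
--             i = i + 1
--             while i < n and (text[i].isalnum() or text[i] in "_$"):
--                 i = i + 1
--             tokens.append(text[start:i])
--             continue
--
--         raise ValueError("Invalid TPTP token near: '" + text[i:].strip() + "'")
--
--     return tokens
-- ===== SOURCE B (Python) =====
-- def _tokenize_formula(text: str) -> list[str]:
--     # Translate each character locally (with one char of lookbehind to glue
--     # '<=' and '=' correctly), join, and let str.split() produce the tokens.
--     pieces: list[str] = []
--     for i, ch in enumerate(text):
--         if ch in " \t\r\n":
--             pieces.append(" ")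
--         elif ch in "(),[]:~&|!?":
--             pieces.append(" " + ch + " ")
--         elif ch.isalnum() or ch in "_$":
--             pieces.append(ch)
--         elif ch == "<":
--             pieces.append(" <")
--         elif ch == "=":
--             pieces.append("=" if i > 0 and text[i - 1] == "<" else " =")
--         elif ch == ">":
--             pieces.append("> ")
--         else:
--             raise ValueError("Invalid TPTP token near: '" + text[i:].strip() + "'")
--     return "".join(pieces).split()
-- ===== Notes on version B (the rewrite author's own statement) =====
-- stated objective: alternative
-- what changed: Replaces A's index-driven scanner (multi-character lookahead slices, an inner word-consuming while loop and explicit position arithmetic) by a local character-to-string translation pass (one char of lookbehind to keep '<=' glued) followed by a single str.split(); tokens are never assembled by the loop itself.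
import Mathlib
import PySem

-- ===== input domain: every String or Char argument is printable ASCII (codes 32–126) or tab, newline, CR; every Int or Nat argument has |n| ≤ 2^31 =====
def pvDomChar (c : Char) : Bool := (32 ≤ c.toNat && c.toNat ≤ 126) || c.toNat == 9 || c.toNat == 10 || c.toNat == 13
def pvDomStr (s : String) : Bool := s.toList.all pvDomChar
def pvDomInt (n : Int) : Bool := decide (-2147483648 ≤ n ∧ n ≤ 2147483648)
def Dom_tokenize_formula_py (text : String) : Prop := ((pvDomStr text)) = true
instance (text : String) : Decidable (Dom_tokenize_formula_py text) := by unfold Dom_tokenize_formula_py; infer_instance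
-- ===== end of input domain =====

-- B re-implements A's index-driven scanner as a local per-character translation (one char of
-- lookbehind) followed by one whitespace split; same tokens at the same linear cost.
-- A raises ValueError on malformed input; exactly those inputs are excluded by Pre_ below.

-- ===== PORT A =====
-- shared character classes (the three literal string sets both Python versions test `ch in` on)
def pyWsChar (c : Char) : Bool := c = ' ' || c = '\t' || c = '\r' || c = '\n'
def pyPunctChar (c : Char) : Bool :=
  c = '(' || c = ')' || c = ',' || c = '[' || c = ']' || c = ':' || c = '~' || c = '&' || c = '|' || c = '!' || c = '?'
def pyWordChar (c : Char) : Bool := PySem.Chars.isalnum c || c = '_' || c = '$'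

-- A's inner `while` that consumes a word run (returns the consumed run and the remainder)
def tokenize_formula_pyWord : List Char → List Char × List Char
  | [] => ([], [])
  | c :: rest =>
    if pyWordChar c then
      ((c :: (tokenize_formula_pyWord rest).1), (tokenize_formula_pyWord rest).2)
    else ([], c :: rest)

theorem tokenize_formula_pyWord_len : ∀ cs : List Char,
    (tokenize_formula_pyWord cs).2.length ≤ cs.length
  | [] => Nat.le_refl _
  | c :: rest => by
    simp only [tokenize_formula_pyWord]
    split
    · exact Nat.le_succ_of_le (tokenize_formula_pyWord_len rest)
    · exact Nat.le_refl _

-- A's outer `while i < n` scanner, acting on the remaining suffix of the text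
def tokenize_formula_pyAux : List Char → List String
  | [] => []
  | c :: rest =>
    if pyWsChar c then
      tokenize_formula_pyAux rest
    else if 2 < (c :: rest).length ∧ PySem.List.slice (c :: rest) (some 0) (some 3) = "<=>".toList then
      "<=>" :: tokenize_formula_pyAux (rest.drop 2)
    else if 1 < (c :: rest).length ∧ PySem.List.slice (c :: rest) (some 0) (some 2) = "=>".toList then
      "=>" :: tokenize_formula_pyAux (rest.drop 1)
    else if pyPunctChar c then
      String.ofList [c] :: tokenize_formula_pyAux rest
    else if pyWordChar c then
      String.ofList (c :: (tokenize_formula_pyWord rest).1) ::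
        tokenize_formula_pyAux (tokenize_formula_pyWord rest).2
    else []  -- Python raises ValueError here; such inputs are outside Pre_
  termination_by cs => cs.length
  decreasing_by all_goals (have hW := tokenize_formula_pyWord_len rest; simp only [List.length_cons, List.length_drop]; omega)

def tokenize_formula_py (text : String) : List String :=
  tokenize_formula_pyAux text.toList

-- ===== PORT B =====
-- Source B's per-character translation (prev is text[i-1] where the Python looks back)
def tokenize_formula_py_altExpand (prev : Option Char) (c : Char) : List Char :=
  if pyWsChar c then [' ']
  else if pyPunctChar c then [' ', c, ' ']
  else if pyWordChar c then [c]
  else if c = '<' then [' ', '<']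
  else if c = '=' then (if prev = some '<' then ['='] else [' ', '='])
  else if c = '>' then ['>', ' ']
  else []  -- Python raises ValueError here; such inputs are outside Pre_

-- Source B's `for i, ch in enumerate(text)` loop building `pieces`, already joined
def tokenize_formula_py_altPieces : Option Char → List Char → List Char
  | _, [] => []
  | prev, c :: rest =>
    tokenize_formula_py_altExpand prev c ++ tokenize_formula_py_altPieces (some c) rest

def tokenize_formula_py_alt (text : String) : List String :=
  (PySem.Chars.split₀ (tokenize_formula_py_altPieces none text.toList)).map String.ofList

-- ===== PRECONDITION & SPEC =====
-- Pre_ excludes exactly the inputs on which A raises ValueError: a character outside the TPTP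
-- alphabet, or a '<', '=' or '>' that does not sit inside an operator occurrence '<=>' / '=>'.
-- the local legality of the character at index i (prev is the preceding character, if any)
def pvOkAt (p : Option Char) (cs : List Char) (i : Nat) : Prop :=
  (pyWsChar cs[i]! || pyPunctChar cs[i]! || pyWordChar cs[i]!) = true ∨
  (cs[i]! = '<' ∧ cs[i + 1]? = some '=' ∧ cs[i + 2]? = some '>') ∨
  (cs[i]! = '=' ∧ (cs[i + 1]? = some '>' ∨ (if i = 0 then p else cs[i - 1]?) = some '<')) ∨
  (cs[i]! = '>' ∧ (if i = 0 then p else cs[i - 1]?) = some '=')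

def Pre_tokenize_formula_py (text : String) : Prop :=
  ∀ i, i < text.toList.length → pvOkAt none text.toList i
instance (text : String) : Decidable (Pre_tokenize_formula_py text) := by
  unfold Pre_tokenize_formula_py pvOkAt; infer_instance

def pvWitness_tokenize_formula_py : String := "p(X1) => ~q(X1, $a_b) <=> ![Y]: r"

def Spec_tokenize_formula_py (text : String) (out : List String) : Prop := out = tokenize_formula_py_alt text
instance (text : String) (out : List String) : Decidable (Spec_tokenize_formula_py text out) := by unfold Spec_tokenize_formula_py; infer_instance

-- ===== CLAIM (what is proved, stated in full; the proofs are below) =====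
def Claim_equal_tokenize_formula_py : Prop := ∀ (text : String), Dom_tokenize_formula_py text → Pre_tokenize_formula_py text → Spec_tokenize_formula_py text (tokenize_formula_py text)

-- ===== LEMMAS AND PROOFS =====

-- the structural form of the precondition the induction walks over
def pyOkChars : Option Char → List Char → Bool
  | _, [] => true
  | prev, c :: rest =>
    (if pyWsChar c || pyPunctChar c || pyWordChar c then true
     else if c = '<' then decide (rest.take 2 = ['=', '>'])
     else if c = '=' then decide (rest.head? = some '>') || decide (prev = some '<')
     else if c = '>' then decide (prev = some '=')
     else false)
    && pyOkChars (some c) rest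

theorem pv_take2_of_getElem? (rest : List Char) (a b : Char)
    (h0 : rest[0]? = some a) (h1 : rest[1]? = some b) : rest.take 2 = [a, b] := by
  cases rest with
  | nil => simp at h0
  | cons x t =>
    cases t with
    | nil => simp at h1
    | cons y t2 =>
      simp only [List.getElem?_cons_zero, Option.some.injEq] at h0
      simp only [List.getElem?_cons_succ, List.getElem?_cons_zero, Option.some.injEq] at h1
      rw [show List.take 2 (x :: y :: t2) = [x, y] from rfl, h0, h1]

theorem pv_okAt_shift (p : Option Char) (c : Char) (rest : List Char) (j : Nat)
    (h : pvOkAt p (c :: rest) (j + 1)) : pvOkAt (some c) rest j := by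
  unfold pvOkAt at h ⊢
  have e1 : (c :: rest)[j + 1]! = rest[j]! := by
    simp [List.getElem!_eq_getElem?_getD]
  have e2 : (c :: rest)[j + 1 + 1]? = rest[j + 1]? := List.getElem?_cons_succ ..
  have e3 : (c :: rest)[j + 1 + 1 + 1]? = rest[j + 1 + 1]? := List.getElem?_cons_succ ..
  have e4 : (if j + 1 = 0 then p else (c :: rest)[j + 1 - 1]?)
      = (if j = 0 then some c else rest[j - 1]?) := by
    cases j with
    | zero => simp
    | succ k => simp [List.getElem?_cons_succ]
  rw [e1, e2, e3, e4] at h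
  exact h

theorem pv_pre_imp : ∀ (cs : List Char) (p : Option Char),
    (∀ i, i < cs.length → pvOkAt p cs i) → pyOkChars p cs = true
  | [], p, _ => rfl
  | c :: rest, p, H => by
    rw [pyOkChars, Bool.and_eq_true]
    constructor
    · have h0 := H 0 (by simp)
      unfold pvOkAt at h0
      simp only [List.getElem!_eq_getElem?_getD, List.getElem?_cons_zero, Option.getD_some,
        List.getElem?_cons_succ, if_true] at h0
      rcases h0 with hcl | ⟨rfl, ha, hb⟩ | ⟨rfl, hor⟩ | ⟨rfl, hp⟩
      · rw [if_pos hcl]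
      · rw [if_neg (by decide), if_pos rfl, decide_eq_true_eq]
        exact pv_take2_of_getElem? rest '=' '>' ha hb
      · rw [if_neg (by decide), if_neg (by decide), if_pos rfl]
        rcases hor with hh | hh
        · rw [List.head?_eq_getElem?, hh]
          simp
        · rw [hh]
          simp
      · rw [if_neg (by decide), if_neg (by decide), if_neg (by decide), if_pos rfl, hp]
        simp
    · exact pv_pre_imp rest (some c)
        (fun j hj => pv_okAt_shift p c rest j (H (j + 1) (by simpa using hj)))

-- character-class facts
theorem pv_alnum_toNat (c : Char) (h : PySem.Chars.isalnum c = true) :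
    (48 ≤ c.toNat ∧ c.toNat ≤ 57) ∨ (65 ≤ c.toNat ∧ c.toNat ≤ 90) ∨ (97 ≤ c.toNat ∧ c.toNat ≤ 122) := by
  simp only [PySem.Chars.isalnum, PySem.Chars.isalpha, PySem.Chars.isdigit, PySem.Chars.isupper,
    PySem.Chars.islower, Bool.or_eq_true, Bool.and_eq_true, decide_eq_true_eq] at h
  rcases h with (⟨h1, h2⟩ | ⟨h1, h2⟩) | ⟨h1, h2⟩
  · exact Or.inr (Or.inl ⟨Fin.mk_le_mk.mp h1, Fin.mk_le_mk.mp h2⟩)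
  · exact Or.inr (Or.inr ⟨Fin.mk_le_mk.mp h1, Fin.mk_le_mk.mp h2⟩)
  · exact Or.inl ⟨Fin.mk_le_mk.mp h1, Fin.mk_le_mk.mp h2⟩

theorem pv_word_spread (c : Char) (h : pyWordChar c = true) :
    pyWsChar c = false ∧ pyPunctChar c = false ∧ c ≠ '<' ∧ c ≠ '=' ∧ c ≠ '>' ∧
      PySem.Chars.isspace c = false := by
  simp only [pyWordChar, Bool.or_eq_true, decide_eq_true_eq] at h
  rcases h with (ha | rfl) | rfl
  · have hb := pv_alnum_toNat c ha
    simp only [pyWsChar, pyPunctChar, PySem.Chars.isspace, Bool.or_eq_false_iff,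
      decide_eq_false_iff_not, Bool.and_eq_false_iff, ne_eq]
    repeat' apply And.intro
    all_goals first
    | (rintro rfl; exact absurd hb (by decide))
    | omega
  · decide
  · decide

theorem pv_punct_spread (c : Char) (h : pyPunctChar c = true) :
    pyWsChar c = false ∧ pyWordChar c = false ∧ c ≠ '<' ∧ c ≠ '=' ∧ c ≠ '>' ∧
      PySem.Chars.isspace c = false := by
  simp only [pyPunctChar, Bool.or_eq_true, decide_eq_true_eq] at h
  rcases h with ((((((((((rfl | rfl) | rfl) | rfl) | rfl) | rfl) | rfl) | rfl) | rfl) | rfl) | rfl) <;> decide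

-- split₀ facts
theorem pv_go_acc : ∀ (l cur : List Char) (acc : List (List Char)),
    PySem.Chars.split₀.go l cur acc = acc.reverse ++ PySem.Chars.split₀.go l cur []
  | [], cur, acc => by
    simp only [PySem.Chars.split₀.go]
    split <;> simp
  | c :: rest, cur, acc => by
    simp only [PySem.Chars.split₀.go]
    split
    · split
      · exact pv_go_acc rest [] acc
      · rw [pv_go_acc rest [] (cur.reverse :: acc), pv_go_acc rest [] [cur.reverse]]
        simp
    · exact pv_go_acc rest (c :: cur) acc

theorem pv_go_word : ∀ (w : List Char), (∀ x ∈ w, PySem.Chars.isspace x = false) →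
    ∀ (l cur : List Char) (acc : List (List Char)),
    PySem.Chars.split₀.go (w ++ l) cur acc = PySem.Chars.split₀.go l (w.reverse ++ cur) acc
  | [], _, l, cur, acc => by simp
  | c :: w', hw, l, cur, acc => by
    have hc : PySem.Chars.isspace c = false := hw c (List.mem_cons_self)
    simp only [List.cons_append, PySem.Chars.split₀.go, hc]
    rw [pv_go_word w' (fun x hx => hw x (List.mem_cons_of_mem _ hx)) l (c :: cur) acc]
    simp

theorem pv_split₀_space_cons (l : List Char) :
    PySem.Chars.split₀ (' ' :: l) = PySem.Chars.split₀ l := by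
  have hsp : PySem.Chars.isspace ' ' = true := by decide
  simp [PySem.Chars.split₀, PySem.Chars.split₀.go, hsp]

theorem pv_split₀_chunk (w : List Char) (hw : w ≠ []) (hns : ∀ x ∈ w, PySem.Chars.isspace x = false)
    (l : List Char) :
    PySem.Chars.split₀ (w ++ ' ' :: l) = w :: PySem.Chars.split₀ l := by
  have hsp : PySem.Chars.isspace ' ' = true := by decide
  have hne : (w.reverse ++ ([] : List Char)).isEmpty = false := by
    simp [List.isEmpty_eq_false_iff, hw]
  unfold PySem.Chars.split₀
  rw [pv_go_word w hns (' ' :: l) [] []]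
  simp only [PySem.Chars.split₀.go, hsp, hne, if_true]
  rw [if_neg (by simp)]
  exact (pv_go_acc l [] _).trans (by simp)

theorem pv_split₀_word (w : List Char) (hw : w ≠ []) (hns : ∀ x ∈ w, PySem.Chars.isspace x = false) :
    PySem.Chars.split₀ w = [w] := by
  have hne : (w.reverse ++ ([] : List Char)).isEmpty = false := by
    simp [List.isEmpty_eq_false_iff, hw]
  unfold PySem.Chars.split₀
  rw [show (w : List Char) = w ++ [] by simp, pv_go_word w hns [] [] []]
  simp only [PySem.Chars.split₀.go, hne]
  simp

-- slices with literal bounds are takes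
theorem pv_slice3 {α : Type} (xs : List α) : PySem.List.slice xs (some 0) (some 3) = xs.take 3 := by
  simp only [PySem.List.slice_zero_start, Nat.ofNat_nonneg, PySem.List.slice_to, Int.reduceToNat]

theorem pv_slice2 {α : Type} (xs : List α) : PySem.List.slice xs (some 0) (some 2) = xs.take 2 := by
  simp only [PySem.List.slice_zero_start, Nat.ofNat_nonneg, PySem.List.slice_to, Int.reduceToNat]

theorem pv_ne_some (c d : Char) (h : c ≠ d) : (some c : Option Char) ≠ some d := by simp [h]

theorem pv_ws_spread (c : Char) (h : pyWsChar c = true) : c ≠ '<' ∧ c ≠ '=' := by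
  simp only [pyWsChar, Bool.or_eq_true, decide_eq_true_eq] at h
  rcases h with ((rfl | rfl) | rfl) | rfl <;> decide

-- A's inner while loop is a span
theorem pv_word_span : ∀ cs : List Char,
    tokenize_formula_pyWord cs = (cs.takeWhile pyWordChar, cs.dropWhile pyWordChar)
  | [] => rfl
  | c :: rest => by
    simp only [tokenize_formula_pyWord, List.takeWhile_cons, List.dropWhile_cons]
    by_cases hc : pyWordChar c = true
    · simp [hc, pv_word_span rest]
    · simp [hc]

theorem pv_dropWhile_head (p : Char → Bool) : ∀ (l r' : List Char) (d : Char),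
    l.dropWhile p = d :: r' → p d = false := by
  intro l
  induction l with
  | nil => intro r' d h; simp [List.dropWhile] at h
  | cons x xs ih =>
    intro r' d h
    rw [List.dropWhile_cons] at h
    by_cases hx : p x = true
    · rw [if_pos hx] at h; exact ih r' d h
    · rw [if_neg hx] at h; cases h; simpa using hx

theorem pv_getLastD_word (c : Char) : ∀ (w : List Char), pyWordChar c = true →
    (∀ x ∈ w, pyWordChar x = true) → pyWordChar (w.getLastD c) = true
  | [], hc, _ => hc
  | x :: w', _, hw => by
    simp only [List.getLastD_cons]
    exact pv_getLastD_word x w' (hw x List.mem_cons_self) (fun y hy => hw y (List.mem_cons_of_mem _ hy))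

-- the expansion of a single character, by class
theorem pv_expand_ws (p : Option Char) (c : Char) (h : pyWsChar c = true) :
    tokenize_formula_py_altExpand p c = [' '] := by
  simp only [tokenize_formula_py_altExpand, h]; rfl

theorem pv_expand_punct (p : Option Char) (c : Char) (h : pyPunctChar c = true) :
    tokenize_formula_py_altExpand p c = [' ', c, ' '] := by
  obtain ⟨hws, -⟩ := pv_punct_spread c h
  simp only [tokenize_formula_py_altExpand, hws, h]; rfl

theorem pv_expand_word (p : Option Char) (c : Char) (h : pyWordChar c = true) :
    tokenize_formula_py_altExpand p c = [c] := by
  obtain ⟨hws, hpc, -⟩ := pv_word_spread c h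
  simp only [tokenize_formula_py_altExpand, hws, hpc, h]; rfl

theorem pv_expand_lt (p : Option Char) : tokenize_formula_py_altExpand p '<' = [' ', '<'] := by
  simp only [tokenize_formula_py_altExpand]
  rw [if_neg (by decide), if_neg (by decide), if_neg (by decide)]
  simp

theorem pv_expand_eq_after_lt : tokenize_formula_py_altExpand (some '<') '=' = ['='] := by decide

theorem pv_expand_eq (p : Option Char) (hp : p ≠ some '<') :
    tokenize_formula_py_altExpand p '=' = [' ', '='] := by
  simp only [tokenize_formula_py_altExpand]
  rw [if_neg (by decide), if_neg (by decide), if_neg (by decide), if_neg (by decide)]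
  simp [hp]

theorem pv_expand_gt (p : Option Char) : tokenize_formula_py_altExpand p '>' = ['>', ' '] := by
  simp only [tokenize_formula_py_altExpand]
  rw [if_neg (by decide), if_neg (by decide), if_neg (by decide), if_neg (by decide),
    if_neg (by decide)]
  simp

-- a word run expands to itself, threading the lookbehind to its last character
theorem pv_pieces_run : ∀ (w : List Char) (p : Option Char) (c : Char) (r : List Char),
    pyWordChar c = true → (∀ x ∈ w, pyWordChar x = true) →
    tokenize_formula_py_altPieces p (c :: (w ++ r)) =
      (c :: w) ++ tokenize_formula_py_altPieces (some (w.getLastD c)) r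
  | [], p, c, r, hc, _ => by
    rw [tokenize_formula_py_altPieces, pv_expand_word p c hc]
    simp
  | x :: w', p, c, r, hc, hw => by
    have hx : pyWordChar x = true := hw x List.mem_cons_self
    rw [show (c :: (x :: w' ++ r) : List Char) = c :: (x :: (w' ++ r)) from rfl,
      tokenize_formula_py_altPieces, pv_expand_word p c hc,
      pv_pieces_run w' (some c) x r hx (fun y hy => hw y (List.mem_cons_of_mem _ hy)),
      List.getLastD_cons]
    simp

-- peeling a word run off the ok-chain
theorem pv_ok_run : ∀ (w : List Char) (c : Char) (r : List Char),
    pyOkChars (some c) (w ++ r) = true → pyOkChars (some (w.getLastD c)) r = true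
  | [], c, r, h => h
  | x :: w', c, r, h => by
    simp only [List.cons_append, pyOkChars, Bool.and_eq_true] at h
    simp only [List.getLastD_cons]
    exact pv_ok_run w' x r h.2

theorem pv_ns_lit (x : Char) (hx : x = '<' ∨ x = '=' ∨ x = '>') :
    PySem.Chars.isspace x = false := by
  rcases hx with rfl | rfl | rfl <;> decide

-- MAIN LEMMA: A's scanner = split₀ of B's translation, for any lookbehind that is not '<' or '='
set_option maxRecDepth 4096 in
theorem pv_main : ∀ (n : Nat) (cs : List Char), cs.length ≤ n → ∀ (p : Option Char),
    p ≠ some '<' → p ≠ some '=' → pyOkChars p cs = true →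
    tokenize_formula_pyAux cs =
      (PySem.Chars.split₀ (tokenize_formula_py_altPieces p cs)).map String.ofList := by
  have h3eq : "<=>".toList = ['<', '=', '>'] := by decide
  have h2eq : "=>".toList = ['=', '>'] := by decide
  intro n
  induction n with
  | zero =>
    intro cs hlen p _ _ _
    rw [List.length_eq_zero_iff.mp (Nat.le_zero.mp hlen)]
    rw [tokenize_formula_pyAux]
    rfl
  | succ n ih =>
    intro cs hlen p hp1 hp2 hok
    match cs with
    | [] =>
      rw [tokenize_formula_pyAux]
      rfl
    | c :: rest =>
      simp only [pyOkChars, Bool.and_eq_true] at hok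
      obtain ⟨hc, hrest⟩ := hok
      have hlen' : rest.length ≤ n := by simpa using hlen
      by_cases hws : pyWsChar c = true
      · -- whitespace: both sides skip it
        obtain ⟨hne1, hne2⟩ := pv_ws_spread c hws
        rw [tokenize_formula_pyAux, if_pos hws]
        rw [show tokenize_formula_py_altPieces p (c :: rest)
            = ' ' :: tokenize_formula_py_altPieces (some c) rest by
          rw [tokenize_formula_py_altPieces, pv_expand_ws p c hws]
          rfl]
        rw [pv_split₀_space_cons]
        exact ih rest hlen' (some c) (pv_ne_some c '<' hne1) (pv_ne_some c '=' hne2) hrest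
      · by_cases hlt : c = '<'
        · -- '<' must start "<=>"
          subst hlt
          rw [if_neg (by decide), if_pos rfl] at hc
          have htake : rest.take 2 = ['=', '>'] := of_decide_eq_true hc
          obtain ⟨r2, rfl⟩ : ∃ r2, rest = '=' :: '>' :: r2 := by
            cases rest with
            | nil => simp at htake
            | cons d t =>
              cases t with
              | nil => simp at htake
              | cons e r2 =>
                rw [show List.take 2 (d :: e :: r2) = [d, e] from rfl] at htake
                obtain ⟨hd, htake2⟩ := List.cons_eq_cons.mp htake
                obtain ⟨he, -⟩ := List.cons_eq_cons.mp htake2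
                exact ⟨r2, by rw [hd, he]⟩
          have hok2 : pyOkChars (some '>') r2 = true := by
            simp only [pyOkChars, Bool.and_eq_true] at hrest
            exact hrest.2.2
          rw [tokenize_formula_pyAux, if_neg (by decide),
            if_pos ⟨by simp, by rw [pv_slice3, h3eq]; rfl⟩,
            show List.drop 2 ('=' :: '>' :: r2) = r2 from rfl]
          rw [show tokenize_formula_py_altPieces p ('<' :: '=' :: '>' :: r2)
              = ' ' :: (['<', '=', '>'] ++ (' ' :: tokenize_formula_py_altPieces (some '>') r2)) by
            simp only [tokenize_formula_py_altPieces, pv_expand_lt p, pv_expand_eq_after_lt,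
              pv_expand_gt (some '=')]
            rfl]
          have hlr2 : r2.length ≤ n := by
            simp only [List.length_cons] at hlen'
            omega
          rw [pv_split₀_space_cons, pv_split₀_chunk ['<', '=', '>'] (by decide) (fun x hx => pv_ns_lit x (by simpa using hx))]
          rw [ih r2 hlr2 (some '>') (pv_ne_some '>' '<' (by decide)) (pv_ne_some '>' '=' (by decide)) hok2]
          rfl
        · by_cases heq : c = '='
          · -- '=' with a lookbehind other than '<' must start "=>"
            subst heq
            rw [if_neg (by decide), if_neg (by decide), if_pos rfl] at hc
            rcases Bool.or_eq_true _ _ |>.mp hc with hh | hh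
            · have hhead : rest.head? = some '>' := of_decide_eq_true hh
              obtain ⟨r1, rfl⟩ : ∃ r1, rest = '>' :: r1 := by
                cases rest with
                | nil => exact absurd hhead (by simp)
                | cons d r1 =>
                  rw [List.head?_cons, Option.some.injEq] at hhead
                  exact ⟨r1, by rw [hhead]⟩
              have hok1 : pyOkChars (some '>') r1 = true := by
                simp only [pyOkChars, Bool.and_eq_true] at hrest
                exact hrest.2
              have hno3 : ¬(2 < ('=' :: '>' :: r1).length ∧
                  PySem.List.slice ('=' :: '>' :: r1) (some 0) (some 3) = "<=>".toList) := by
                rintro ⟨-, hsl⟩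
                rw [pv_slice3, h3eq] at hsl
                simp only [List.take_succ_cons, List.cons_eq_cons] at hsl
                exact absurd hsl.1 (by decide)
              rw [tokenize_formula_pyAux, if_neg (by decide), if_neg hno3,
                if_pos ⟨by simp, by rw [pv_slice2, h2eq]; rfl⟩,
                show List.drop 1 ('>' :: r1) = r1 from rfl]
              rw [show tokenize_formula_py_altPieces p ('=' :: '>' :: r1)
                  = ' ' :: (['=', '>'] ++ (' ' :: tokenize_formula_py_altPieces (some '>') r1)) by
                simp only [tokenize_formula_py_altPieces, pv_expand_eq p hp1,
                  pv_expand_gt (some '=')]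
                rfl]
              have hlr1 : r1.length ≤ n := by
                simp only [List.length_cons] at hlen'
                omega
              rw [pv_split₀_space_cons, pv_split₀_chunk ['=', '>'] (by decide) (fun x hx => pv_ns_lit x (Or.inr (by simpa using hx)))]
              rw [ih r1 hlr1 (some '>') (pv_ne_some '>' '<' (by decide)) (pv_ne_some '>' '=' (by decide)) hok1]
              rfl
            · exact absurd (of_decide_eq_true hh) hp1
          · by_cases hgt : c = '>'
            · -- '>' is only legal right after '=', which the lookbehind never is
              subst hgt
              rw [if_neg (by decide), if_neg (by decide), if_neg (by decide), if_pos rfl] at hc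
              exact absurd (of_decide_eq_true hc) hp2
            · by_cases hpc : pyPunctChar c = true
              · -- punctuation: a single-character token
                obtain ⟨-, -, hne1, hne2, -, hns⟩ := pv_punct_spread c hpc
                have hno3 : ¬(2 < (c :: rest).length ∧
                    PySem.List.slice (c :: rest) (some 0) (some 3) = "<=>".toList) := by
                  rintro ⟨-, hsl⟩
                  rw [pv_slice3, h3eq] at hsl
                  simp only [List.take_succ_cons, List.cons_eq_cons] at hsl
                  exact hlt hsl.1
                have hno2 : ¬(1 < (c :: rest).length ∧
                    PySem.List.slice (c :: rest) (some 0) (some 2) = "=>".toList) := by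
                  rintro ⟨-, hsl⟩
                  rw [pv_slice2, h2eq] at hsl
                  simp only [List.take_succ_cons, List.cons_eq_cons] at hsl
                  exact heq hsl.1
                rw [tokenize_formula_pyAux, if_neg (by simp [hws]), if_neg hno3, if_neg hno2,
                  if_pos hpc]
                rw [show tokenize_formula_py_altPieces p (c :: rest)
                    = ' ' :: ([c] ++ (' ' :: tokenize_formula_py_altPieces (some c) rest)) by
                  rw [tokenize_formula_py_altPieces, pv_expand_punct p c hpc]
                  rfl]
                rw [pv_split₀_space_cons, pv_split₀_chunk [c] (by simp) (by simpa using hns)]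
                rw [ih rest hlen' (some c) (pv_ne_some c '<' hne1) (pv_ne_some c '=' hne2) hrest]
                rfl
              · by_cases hwd : pyWordChar c = true
                · -- a word run
                  obtain ⟨-, -, -, -, -, hnsc⟩ := pv_word_spread c hwd
                  have hno3 : ¬(2 < (c :: rest).length ∧
                      PySem.List.slice (c :: rest) (some 0) (some 3) = "<=>".toList) := by
                    rintro ⟨-, hsl⟩
                    rw [pv_slice3, h3eq] at hsl
                    simp only [List.take_succ_cons, List.cons_eq_cons] at hsl
                    exact hlt hsl.1
                  have hno2 : ¬(1 < (c :: rest).length ∧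
                      PySem.List.slice (c :: rest) (some 0) (some 2) = "=>".toList) := by
                    rintro ⟨-, hsl⟩
                    rw [pv_slice2, h2eq] at hsl
                    simp only [List.take_succ_cons, List.cons_eq_cons] at hsl
                    exact heq hsl.1
                  rw [tokenize_formula_pyAux, if_neg (by simp [hws]), if_neg hno3, if_neg hno2,
                    if_neg (by simp [hpc]), if_pos hwd, pv_word_span rest]
                  have hsplit : rest = rest.takeWhile pyWordChar ++ rest.dropWhile pyWordChar :=
                    (List.takeWhile_append_dropWhile).symm
                  set w := rest.takeWhile pyWordChar with hwdef
                  set r := rest.dropWhile pyWordChar with hrdef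
                  have hwall : ∀ x ∈ w, pyWordChar x = true := fun x hx =>
                    List.mem_takeWhile_imp hx
                  have hlast : pyWordChar (w.getLastD c) = true := pv_getLastD_word c w hwd hwall
                  obtain ⟨-, -, hl1, hl2, -, -⟩ := pv_word_spread _ hlast
                  have hnsrun : ∀ x ∈ c :: w, PySem.Chars.isspace x = false := by
                    intro x hx
                    rcases List.mem_cons.mp hx with rfl | hx'
                    · exact hnsc
                    · exact (pv_word_spread x (hwall x hx')).2.2.2.2.2
                  have hokr : pyOkChars (some (w.getLastD c)) r = true := by
                    apply pv_ok_run
                    rw [← hsplit]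
                    exact hrest
                  have hlenr : r.length ≤ n := by
                    rw [hsplit] at hlen'
                    simp at hlen'
                    omega
                  have hihr := ih r hlenr (some (w.getLastD c))
                    (pv_ne_some _ '<' hl1) (pv_ne_some _ '=' hl2) hokr
                  rw [show (c :: rest : List Char) = c :: (w ++ r) by rw [← hsplit],
                    pv_pieces_run w p c r hwd hwall, hihr]
                  match r, hokr with
                  | [], _ =>
                    rw [show tokenize_formula_py_altPieces (some (w.getLastD c)) [] = [] from rfl,
                      List.append_nil, pv_split₀_word (c :: w) (by simp) hnsrun]
                    rfl
                  | d :: r', hokr =>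
                    have hdw : pyWordChar d = false :=
                      pv_dropWhile_head pyWordChar rest r' d hrdef.symm
                    have hd : (if pyWsChar d || pyPunctChar d || pyWordChar d then true
                        else if d = '<' then decide ((r' : List Char).take 2 = ['=', '>'])
                        else if d = '=' then decide (r'.head? = some '>') ||
                          decide (some (w.getLastD c) = some '<')
                        else if d = '>' then decide (some (w.getLastD c) = some '=')
                        else false) = true := by
                      simp only [pyOkChars, Bool.and_eq_true] at hokr
                      exact hokr.1
                    obtain ⟨t, ht⟩ : ∃ t,
                        tokenize_formula_py_altExpand (some (w.getLastD c)) d = ' ' :: t := by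
                      by_cases h1 : pyWsChar d = true
                      · exact ⟨[], pv_expand_ws _ d h1⟩
                      · by_cases h2 : pyPunctChar d = true
                        · exact ⟨[d, ' '], pv_expand_punct _ d h2⟩
                        · by_cases h3 : d = '<'
                          · subst h3
                            exact ⟨['<'], pv_expand_lt _⟩
                          · by_cases h4 : d = '='
                            · subst h4
                              exact ⟨['='], pv_expand_eq _ (pv_ne_some _ '<' hl1)⟩
                            · by_cases h5 : d = '>'
                              · subst h5
                                exfalso
                                rw [if_neg (by simp [h1, h2, hdw]), if_neg (by decide),
                                  if_neg (by decide), if_pos rfl] at hd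
                                exact absurd (of_decide_eq_true hd) (pv_ne_some _ '=' hl2)
                              · exfalso
                                rw [if_neg (by simp [h1, h2, hdw]), if_neg h3, if_neg h4,
                                  if_neg h5] at hd
                                exact absurd hd (by decide)
                    rw [show tokenize_formula_py_altPieces (some (w.getLastD c)) (d :: r')
                        = ' ' :: (t ++ tokenize_formula_py_altPieces (some d) r') by
                      rw [tokenize_formula_py_altPieces, ht]
                      rfl]
                    rw [pv_split₀_chunk (c :: w) (by simp) hnsrun, pv_split₀_space_cons]
                    rfl
                · -- no character class and no operator: pyOkChars is false, vacuous
                  exfalso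
                  rw [if_neg (by simp [hws, hpc, hwd]), if_neg hlt, if_neg heq, if_neg hgt] at hc
                  exact absurd hc (by decide)

-- ===== VERDICT (by name: the statement is the Claim_ definition above) =====
theorem tokenize_formula_py_spec : Claim_equal_tokenize_formula_py := by
  intro text _ hpre
  unfold Spec_tokenize_formula_py tokenize_formula_py tokenize_formula_py_alt
  exact pv_main text.toList.length text.toList (Nat.le_refl _) none
    (by rintro ⟨⟩) (by rintro ⟨⟩) (pv_pre_imp text.toList none hpre)
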